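-- pv_equiv track=rewrite | github.com/deepomicslab/PALACE | share/palace/scripts/filter_ragtag.py | reverse_and_flip_directions
-- ===== SOURCE A (Python) =====
-- def reverse_and_flip_directions(input_string):
--     """
--     Reverse the sequence of segments in the input string while flipping their orientations.
--     Each segment is presumed to end with a '+' or '-' indicating its orientation.
--
--     :param input_string: str, the input string with segments ending in '+' or '-'
--     :return: str, the reversed string with flipped orientations
--     """
--     # Split the string into segments based on the end characters '+' and '-'
--     segments = []
--     current_segment = ""
--
--     for char in input_string:
--         if char in '+-':
--             # Add the current segment with the orientation character
--             segments.append(current_segment + char)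
--             current_segment = ""
--         else:
--             current_segment += char
--
--     # Reverse the list of segments
--     segments.reverse()
--
--     # Flip the orientation of each segment
--     flipped_segments = []
--     for segment in segments:
--         if segment[-1] == '+':
--             flipped_segments.append(segment[:-1] + '-')
--         else:
--             flipped_segments.append(segment[:-1] + '+')
--
--     # Join the segments back into a single string
--     return ''.join(flipped_segments)
-- ===== SOURCE B (Python) =====
-- def reverse_and_flip_directions(input_string):
--     """Single reverse pass: scan the string from the end; a pending flipped
--     orientation is emitted with the content collected since it, so pieces come
--     out already in output order (no segment list, no list reversal)."""
--     flip = {'+': '-', '-': '+'}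
--     pieces = []
--     acc = []
--     pending = None
--     for ch in reversed(input_string):
--         if ch in flip:
--             if pending is not None:
--                 acc.reverse()
--                 pieces.append(''.join(acc) + pending)
--             acc = []
--             pending = flip[ch]
--         else:
--             acc.append(ch)
--     if pending is not None:
--         acc.reverse()
--         pieces.append(''.join(acc) + pending)
--     return ''.join(pieces)
-- ===== Notes on version B (the rewrite author's own statement) =====
-- stated objective: alternative
-- what changed: B replaces A's three-stage pipeline (split into a segment list, reverse the list, flip each segment) by a single backward scan over the string that emits flipped pieces directly in output order, keeping only a pending orientation and a content accumulator.
import Mathlib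
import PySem

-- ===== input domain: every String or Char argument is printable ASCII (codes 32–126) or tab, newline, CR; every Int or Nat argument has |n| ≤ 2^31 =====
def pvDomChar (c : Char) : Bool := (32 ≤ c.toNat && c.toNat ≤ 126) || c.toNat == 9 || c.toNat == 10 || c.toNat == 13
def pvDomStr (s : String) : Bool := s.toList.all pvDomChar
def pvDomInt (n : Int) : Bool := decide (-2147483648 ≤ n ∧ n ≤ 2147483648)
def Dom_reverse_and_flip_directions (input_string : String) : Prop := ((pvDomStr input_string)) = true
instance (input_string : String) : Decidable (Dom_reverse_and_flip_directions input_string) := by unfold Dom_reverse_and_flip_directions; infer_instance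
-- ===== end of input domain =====

-- B replaces A's split / reverse-the-list / flip-each-segment pipeline by one backward scan
-- that emits pieces directly in output order (objective: alternative; same O(n) cost).

-- ===== PORT A =====
-- loop body of A's first for-loop: state = (segments, current_segment)
def pvA_step (st : List (List Char) × List Char) (ch : Char) :
    List (List Char) × List Char :=
  if ch = '+' ∨ ch = '-' then (st.1 ++ [st.2 ++ [ch]], [])
  else (st.1, st.2 ++ [ch])

-- body of A's second loop: segment[-1] is never on an empty segment (every stored
-- segment ends with its delimiter), so getLast? = some '+' is exact; segment[:-1] = dropLast
def pvA_flipSeg (seg : List Char) : List Char :=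
  if seg.getLast? = some '+' then seg.dropLast ++ ['-'] else seg.dropLast ++ ['+']

def reverse_and_flip_directions (input_string : String) : String :=
  let st := input_string.toList.foldl pvA_step ([], [])
  let segments := st.1.reverse
  let flipped := segments.map pvA_flipSeg
  String.mk flipped.flatten

-- ===== PORT B =====
-- loop body of B: state = (pieces, acc, pending); acc holds content chars in reversed order
def pvB_step (st : List (List Char) × List Char × Option Char) (ch : Char) :
    List (List Char) × List Char × Option Char :=
  if ch = '+' ∨ ch = '-' then
    (match st.2.2 with
     | some p => st.1 ++ [st.2.1.reverse ++ [p]]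
     | none => st.1,
     ([] : List Char), some (if ch = '+' then '-' else '+'))
  else (st.1, st.2.1 ++ [ch], st.2.2)

def reverse_and_flip_directions_alt (input_string : String) : String :=
  let st := input_string.toList.reverse.foldl pvB_step ([], [], none)
  let pieces : List (List Char) :=
    match st.2.2 with
    | some p => st.1 ++ [st.2.1.reverse ++ [p]]
    | none => st.1
  String.mk pieces.flatten

-- ===== PRECONDITION & SPEC =====
def Spec_reverse_and_flip_directions (input_string : String) (out : String) : Prop := out = reverse_and_flip_directions_alt input_string
instance (input_string : String) (out : String) : Decidable (Spec_reverse_and_flip_directions input_string out) := by unfold Spec_reverse_and_flip_directions; infer_instance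

-- ===== CLAIM (what is proved, stated in full; the proofs are below) =====
def Claim_equal_reverse_and_flip_directions : Prop := ∀ (input_string : String), Dom_reverse_and_flip_directions input_string → Spec_reverse_and_flip_directions input_string (reverse_and_flip_directions input_string)

-- ===== LEMMAS AND PROOFS =====

-- common characterisation: the flipped pieces, in output order, of `l` when the
-- current segment already carries prefix content `cur`
def pvGP (cur : List Char) : List Char → List (List Char)
  | [] => []
  | c :: t =>
    if c = '+' ∨ c = '-' then pvGP [] t ++ [cur ++ [if c = '+' then '-' else '+']]
    else pvGP (cur ++ [c]) t

lemma pvA_char (l : List Char) : ∀ (segs : List (List Char)) (cur : List Char),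
    ((l.foldl pvA_step (segs, cur)).1).reverse.map pvA_flipSeg
      = pvGP cur l ++ segs.reverse.map pvA_flipSeg := by
  induction l with
  | nil => intro segs cur; simp [pvGP]
  | cons c t ih =>
    intro segs cur
    by_cases h : c = '+' ∨ c = '-'
    · simp only [List.foldl_cons, pvA_step, if_pos h, pvGP]
      rw [ih]
      have hflip : pvA_flipSeg (cur ++ [c]) = cur ++ [if c = '+' then '-' else '+'] := by
        rcases h with h | h <;> subst h <;>
          simp [pvA_flipSeg]
      simp [hflip]
    · simp only [List.foldl_cons, pvA_step, if_neg h, pvGP]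
      exact ih segs (cur ++ [c])

-- finalize B's state, with ghost prefix content `cur` still to be prepended
def pvFin (cur : List Char) (st : List (List Char) × List Char × Option Char) :
    List (List Char) :=
  match st.2.2 with
  | some p => st.1 ++ [cur ++ st.2.1.reverse ++ [p]]
  | none => st.1

lemma pvB_char (l : List Char) : ∀ (cur : List Char),
    pvFin cur (l.reverse.foldl pvB_step ([], [], none)) = pvGP cur l := by
  induction l with
  | nil => intro cur; simp [pvFin, pvGP]
  | cons c t ih =>
    intro cur
    rw [List.reverse_cons, List.foldl_append]
    by_cases h : c = '+' ∨ c = '-'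
    · simp only [List.foldl_cons, List.foldl_nil, pvB_step, pvGP, if_pos h]
      rcases hst : t.reverse.foldl pvB_step ([], [], none) with ⟨P, a, pd⟩
      have := ih []
      rw [hst] at this
      cases pd <;> simp_all [pvFin]
    · simp only [List.foldl_cons, List.foldl_nil, pvB_step, pvGP, if_neg h]
      rcases hst : t.reverse.foldl pvB_step ([], [], none) with ⟨P, a, pd⟩
      have := ih (cur ++ [c])
      rw [hst] at this
      cases pd <;> simp_all [pvFin]

-- ===== VERDICT (by name: the statement is the Claim_ definition above) =====
theorem reverse_and_flip_directions_spec : Claim_equal_reverse_and_flip_directions := by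
  intro s _
  unfold Spec_reverse_and_flip_directions reverse_and_flip_directions reverse_and_flip_directions_alt
  have hA := pvA_char s.toList [] []
  have hB := pvB_char s.toList []
  simp only [List.reverse_nil, List.map_nil, List.append_nil] at hA
  rcases hst : s.toList.reverse.foldl pvB_step ([], [], none) with ⟨P, a, pd⟩
  rw [hst] at hB
  cases pd <;> simp_all [pvFin]
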